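-- pv_equiv track=rewrite | github.com/XuCai021130/NLP_Fundamental | hw2.py | trigram_counts
-- ===== SOURCE A (Python) =====
-- from collections import defaultdict, Counter
-- from typing import Sequence, Iterable, Generator, TypeVar, Union, Generic, final
--
-- START_TOKEN = "<START>"
--
-- END_TOKEN = "<END>"
--
-- def trigram_counts(
--     sentences: Iterable[Sequence[str]],
-- ) -> dict[tuple[str, str], dict[str, int]]:
--     counting = defaultdict(Counter)
--
--     for sentence in sentences:
--         for first, second, third in trigrams(sentence):
--             counting[(first, second)][third] += 1
--     return {key: dict(counting[key]) for key in counting}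
--
-- def trigrams(sentence: Sequence[str]) -> list[tuple[str, str, str]]:
--     sentence = (START_TOKEN,) + (START_TOKEN,) + tuple(sentence) + (END_TOKEN,)
--     res = list()
--
--     for i in range(len(sentence) - 2):
--         res.append(tuple([sentence[i], sentence[i + 1], sentence[i + 2]]))
--     return res
-- ===== SOURCE B (Python) =====
-- START_TOKEN = "<START>"
--
-- END_TOKEN = "<END>"
--
--
-- def trigram_counts(sentences):
--     # Group-by-scan: materialise the full trigram list first, then for each
--     # distinct bigram key (first-occurrence order) filter its thirds and count
--     # each distinct third by scanning that group. No counting dict is built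
--     # while streaming.
--     tris = []
--     for sentence in sentences:
--         padded = [START_TOKEN, START_TOKEN, *sentence, END_TOKEN]
--         tris.extend(zip(padded, padded[1:], padded[2:]))
--     result = {}
--     for key in dict.fromkeys((a, b) for a, b, _ in tris):
--         thirds = [c for a, b, c in tris if (a, b) == key]
--         result[key] = {c: thirds.count(c) for c in dict.fromkeys(thirds)}
--     return result
-- ===== Notes on version B (the rewrite author's own statement) =====
-- stated objective: alternative
-- what changed: B abandons A's streaming defaultdict(Counter) accumulation: it first materialises the flat list of all padded trigrams, then answers by group-by-scan — for each distinct bigram key it filters that key's thirds out of the list and counts each distinct third with list.count — so no counting structure is maintained during the pass.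
import Mathlib
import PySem

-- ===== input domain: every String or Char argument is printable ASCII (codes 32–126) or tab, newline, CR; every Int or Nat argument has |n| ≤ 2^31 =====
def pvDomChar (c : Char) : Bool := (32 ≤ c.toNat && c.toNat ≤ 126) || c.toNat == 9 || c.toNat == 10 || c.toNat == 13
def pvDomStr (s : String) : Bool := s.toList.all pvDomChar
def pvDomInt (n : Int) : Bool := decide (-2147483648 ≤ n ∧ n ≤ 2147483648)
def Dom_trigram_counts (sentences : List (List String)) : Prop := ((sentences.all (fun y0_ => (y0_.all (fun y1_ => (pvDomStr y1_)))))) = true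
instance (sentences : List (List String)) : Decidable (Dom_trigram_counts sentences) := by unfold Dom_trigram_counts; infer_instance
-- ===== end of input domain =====

-- B replaces A's streaming defaultdict(Counter) accumulation by a group-by-scan: it materialises
-- the flat trigram list, then per distinct bigram key filters the thirds and counts each with
-- list.count (objective: alternative algorithm, not claimed faster).

-- ===== PORT A =====
-- helper 'trigrams': pads then appends sentence[i..i+2] for i in range(len-2) (indices always in range)
def pvTrigrams (sentence : List String) : List (String × String × String) :=
  let s := ["<START>", "<START>"] ++ sentence ++ ["<END>"]
  (PySem.List.pyRange 0 ((s.length : Int) - 2)).foldl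
    (fun res i => res ++ [(PySem.List.pyGetD s i "", PySem.List.pyGetD s (i+1) "", PySem.List.pyGetD s (i+2) "")]) []

def trigram_counts (sentences : List (List String)) : List (String × String × List (String × Int)) :=
  let counting : PySem.Dict (String × String) (PySem.Dict String Int) :=
    sentences.foldl (fun counting sentence =>
      (pvTrigrams sentence).foldl (fun counting t =>
        -- counting[(first, second)][third] += 1 : defaultdict access inserts/updates in place
        counting.insert (t.1, t.2.1)
          ((counting.getD (t.1, t.2.1) PySem.Dict.empty).modify t.2.2 0 (· + 1))) counting)
      PySem.Dict.empty
  -- {key: dict(counting[key]) for key in counting} : order-preserving conversion to the output type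
  counting.items.map (fun p => (p.1.1, p.1.2, p.2.items))

-- ===== PORT B =====
def trigram_counts_alt (sentences : List (List String)) : List (String × String × List (String × Int)) :=
  -- tris.extend(zip(padded, padded[1:], padded[2:])) ; slices xs[1:]/xs[2:] are drops
  let tris : List (String × String × String) :=
    sentences.foldl (fun tris sentence =>
      let padded := ["<START>", "<START>"] ++ sentence ++ ["<END>"]
      tris ++ padded.zip ((padded.drop 1).zip (padded.drop 2))) []
  -- dict.fromkeys((a, b) for a, b, _ in tris) : distinct keys in first-occurrence order
  let keys := PySem.Set.ofList (tris.map (fun t => (t.1, t.2.1)))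
  -- for key in keys: result[key] = {c: thirds.count(c) for c in dict.fromkeys(thirds)}
  keys.foldl (fun res k =>
    let thirds := (tris.filter (fun t => (t.1, t.2.1) == k)).map (fun t => t.2.2)
    res ++ [(k.1, k.2, (PySem.Set.ofList thirds).map (fun c => (c, (thirds.count c : Int))))]) []

-- ===== PRECONDITION & SPEC =====
def Spec_trigram_counts (sentences : List (List String)) (out : List (String × String × List (String × Int))) : Prop := out = trigram_counts_alt sentences
instance (sentences : List (List String)) (out : List (String × String × List (String × Int))) : Decidable (Spec_trigram_counts sentences out) := by unfold Spec_trigram_counts; infer_instance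

-- ===== CLAIM (what is proved, stated in full; the proofs are below) =====
def Claim_equal_trigram_counts : Prop := ∀ (sentences : List (List String)), Dom_trigram_counts sentences → Spec_trigram_counts sentences (trigram_counts sentences)

-- ===== LEMMAS AND PROOFS =====

def pvKey2 (t : String × String × String) : String × String := (t.1, t.2.1)
def pvThd (t : String × String × String) : String := t.2.2

-- canonical value A's accumulation reaches: outer keys in first-occurrence order of (first, second),
-- inner dict = counter of the thirds of that group's trigrams
def pvInner (ts : List (String × String × String)) (k : String × String) : PySem.Dict String Int :=
  PySem.Dict.counter ((ts.filter (fun t => pvKey2 t == k)).map pvThd)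

def pvCanon (ts : List (String × String × String)) : PySem.Dict (String × String) (PySem.Dict String Int) :=
  ⟨(PySem.Set.ofList (ts.map pvKey2)).map (fun k => (k, pvInner ts k))⟩

lemma pvSet_ofList_append {α : Type} [BEq α] (xs : List α) (x : α) :
    PySem.Set.ofList (xs ++ [x]) = PySem.Set.add (PySem.Set.ofList xs) x := by
  simp [PySem.Set.ofList_eq_foldl, List.foldl_append]

lemma pvSet_add_of_mem {α : Type} [BEq α] [LawfulBEq α] (s : PySem.Set α) {x : α} (h : x ∈ s) :
    PySem.Set.add s x = s := by
  simp [PySem.Set.add, PySem.Set.contains, h]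

lemma pvSet_add_of_not_mem {α : Type} [BEq α] [LawfulBEq α] (s : PySem.Set α) {x : α} (h : x ∉ s) :
    PySem.Set.add s x = s ++ [x] := by
  simp [PySem.Set.add, PySem.Set.contains, h]

lemma pvKeys_canon (ts : List (String × String × String)) :
    (pvCanon ts).keys = PySem.Set.ofList (ts.map pvKey2) := by
  simp [pvCanon, PySem.Dict.keys, List.map_map, Function.comp_def]

lemma pvGetD_canon (ts : List (String × String × String)) (k : String × String) :
    (pvCanon ts).getD k PySem.Dict.empty = pvInner ts k := by
  by_cases h : k ∈ PySem.Set.ofList (ts.map pvKey2)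
  · refine PySem.Dict.getD_of_mem_items (pvCanon ts) ?_ ?_ _
    · show (k, pvInner ts k) ∈ (PySem.Set.ofList (ts.map pvKey2)).map (fun k => (k, pvInner ts k))
      exact List.mem_map_of_mem h
    · rw [pvKeys_canon]; exact PySem.Set.nodup_ofList _
  · have hfil : ts.filter (fun t => pvKey2 t == k) = [] := by
      refine List.filter_eq_nil_iff.mpr (fun t ht hbeq => h ?_)
      rw [PySem.Set.mem_ofList]
      exact List.mem_map.mpr ⟨t, ht, by simpa using hbeq⟩
    rw [PySem.Dict.getD_of_not_contains, pvInner, hfil]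
    · rfl
    · rw [PySem.Dict.contains_eq_decide_mem_keys, pvKeys_canon]
      simpa using h

lemma pvInner_append_self (ts : List (String × String × String)) (t : String × String × String) :
    pvInner (ts ++ [t]) (pvKey2 t) = (pvInner ts (pvKey2 t)).modify (pvThd t) 0 (· + 1) := by
  rw [pvInner, pvInner, List.filter_append, List.map_append]
  simp
  rw [PySem.Dict.counter_append_singleton]

lemma pvInner_append_ne (ts : List (String × String × String)) (t : String × String × String)
    (k : String × String) (h : k ≠ pvKey2 t) : pvInner (ts ++ [t]) k = pvInner ts k := by
  rw [pvInner, pvInner, List.filter_append]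
  simp [Ne.symm h]

lemma pvCanon_append (ts : List (String × String × String)) (t : String × String × String) :
    (pvCanon ts).insert (pvKey2 t) ((pvInner ts (pvKey2 t)).modify (pvThd t) 0 (· + 1))
    = pvCanon (ts ++ [t]) := by
  rw [← pvInner_append_self]
  by_cases h : pvKey2 t ∈ PySem.Set.ofList (ts.map pvKey2)
  · apply PySem.Dict.ext
    rw [PySem.Dict.items_insert_of_contains _ _ (by
      rw [PySem.Dict.contains_eq_decide_mem_keys, pvKeys_canon]; simpa using h)]
    show ((PySem.Set.ofList (ts.map pvKey2)).map (fun k => (k, pvInner ts k))).map _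
      = (pvCanon (ts ++ [t])).items
    rw [List.map_map]
    show _ = (PySem.Set.ofList ((ts ++ [t]).map pvKey2)).map (fun k => (k, pvInner (ts ++ [t]) k))
    rw [List.map_append]
    simp only [List.map_cons, List.map_nil]
    rw [pvSet_ofList_append, pvSet_add_of_mem _ h]
    apply List.map_congr_left
    intro k hk
    by_cases hkt : k = pvKey2 t
    · subst hkt; simp [Function.comp]
    · simp only [Function.comp_apply]
      rw [if_neg (by simpa using hkt), pvInner_append_ne ts t k hkt]
  · apply PySem.Dict.ext
    rw [PySem.Dict.items_insert_of_not_contains _ _ (by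
      rw [PySem.Dict.contains_eq_decide_mem_keys, pvKeys_canon]; simpa using h)]
    show ((PySem.Set.ofList (ts.map pvKey2)).map (fun k => (k, pvInner ts k))) ++ _
      = (PySem.Set.ofList ((ts ++ [t]).map pvKey2)).map (fun k => (k, pvInner (ts ++ [t]) k))
    rw [List.map_append]
    simp only [List.map_cons, List.map_nil]
    rw [pvSet_ofList_append, pvSet_add_of_not_mem _ h, List.map_append]
    congr 1
    apply List.map_congr_left
    intro k hk
    have hkt : k ≠ pvKey2 t := fun he => h (he ▸ hk)
    rw [pvInner_append_ne ts t k hkt]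

-- A's nested accumulation over the flat trigram stream reaches the canonical dict
lemma pvNestA (ts : List (String × String × String)) :
    ts.foldl (fun counting t =>
      counting.insert (t.1, t.2.1)
        ((counting.getD (t.1, t.2.1) PySem.Dict.empty).modify t.2.2 0 (· + 1))) PySem.Dict.empty
    = pvCanon ts := by
  induction ts using List.reverseRecOn with
  | nil => rfl
  | append_singleton ts t ih =>
    rw [List.foldl_append, ih]
    simp only [List.foldl_cons, List.foldl_nil]
    show (pvCanon ts).insert (pvKey2 t)
      (((pvCanon ts).getD (pvKey2 t) PySem.Dict.empty).modify (pvThd t) 0 (· + 1)) = _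
    rw [pvGetD_canon, pvCanon_append]

lemma pvGetTri (p : List String) :
    (List.range (p.length - 2)).map (fun i => (p.getD i "", p.getD (i+1) "", p.getD (i+2) ""))
    = p.zip ((p.drop 1).zip (p.drop 2)) := by
  induction p with
  | nil => rfl
  | cons x p' ih =>
    rcases p' with _ | ⟨y, p''⟩
    · rfl
    rcases p'' with _ | ⟨z, r⟩
    · rfl
    show (List.range (r.length + 1)).map _ = _
    rw [List.range_succ_eq_map]
    simp only [List.map_cons, List.map_map]
    refine congrArg₂ List.cons rfl ?_
    show (List.range r.length).map _ = (y :: z :: r).zip (((y :: z :: r).drop 1).zip ((y :: z :: r).drop 2))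
    rw [← ih]
    show _ = (List.range ((y :: z :: r).length - 2)).map _
    apply List.map_congr_left
    intro i _
    simp [Function.comp]

lemma pvTrigrams_eq_zip (s : List String) :
    (["<START>", "<START>"] ++ s ++ ["<END>"]).zip
      (((["<START>", "<START>"] ++ s ++ ["<END>"]).drop 1).zip
        ((["<START>", "<START>"] ++ s ++ ["<END>"]).drop 2))
    = pvTrigrams s := by
  set pd := ["<START>", "<START>"] ++ s ++ ["<END>"] with hpd
  show _ = (PySem.List.pyRange 0 ((pd.length : Int) - 2)).foldl _ []
  rw [PySem.List.foldl_append_singleton_eq_map, List.nil_append]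
  have hlen : pd.length = s.length + 3 := by simp [hpd]
  have hcast : (pd.length : Int) - 2 = ((s.length + 1 : Nat) : Int) := by
    rw [hlen]; push_cast; ring
  rw [hcast, PySem.List.pyRange_zero_natCast, List.map_map]
  have hpt : ∀ i : Nat, (PySem.List.pyGetD pd (↑i) "", PySem.List.pyGetD pd (↑i + 1) "",
      PySem.List.pyGetD pd (↑i + 2) "") = (pd.getD i "", pd.getD (i+1) "", pd.getD (i+2) "") := by
    intro i
    have h1 : ((i : Int) + 1) = ((i + 1 : Nat) : Int) := by push_cast; ring
    have h2 : ((i : Int) + 2) = ((i + 2 : Nat) : Int) := by push_cast; ring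
    rw [h1, h2, PySem.List.pyGetD_natCast, PySem.List.pyGetD_natCast, PySem.List.pyGetD_natCast]
  have hlen2 : s.length + 1 = pd.length - 2 := by omega
  rw [← pvGetTri pd, ← hlen2]
  apply List.map_congr_left
  intro i _
  exact (hpt i).symm

theorem trigram_counts_spec : Claim_equal_trigram_counts := by
  intro sentences _
  show trigram_counts sentences = trigram_counts_alt sentences
  simp only [trigram_counts, trigram_counts_alt, pvTrigrams_eq_zip]
  -- both trigram streams are the same flat list
  have htris : sentences.foldl (fun tris s => tris ++ pvTrigrams s) [] =
      sentences.flatMap pvTrigrams := by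
    rw [PySem.List.foldl_append_eq_flatMap, List.nil_append]
  rw [← List.foldl_flatMap, pvNestA, htris]
  -- B's append loop over the distinct keys is a map
  rw [PySem.List.foldl_append_singleton_eq_map
    (f := fun k => (k.1, k.2, (PySem.Set.ofList
      (((sentences.flatMap pvTrigrams).filter (fun t => (t.1, t.2.1) == k)).map
        (fun t => t.2.2))).map (fun c =>
          (c, ((((sentences.flatMap pvTrigrams).filter (fun t => (t.1, t.2.1) == k)).map
            (fun t => t.2.2)).count c : Int))))), List.nil_append]
  -- A's output = map over canonical items
  show ((PySem.Set.ofList ((sentences.flatMap pvTrigrams).map pvKey2)).map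
      (fun k => (k, pvInner (sentences.flatMap pvTrigrams) k))).map
      (fun p => (p.1.1, p.1.2, p.2.items)) = _
  rw [List.map_map]
  apply List.map_congr_left
  intro k _
  simp only [Function.comp_apply]
  rw [pvInner, PySem.Dict.items_counter]
  rfl
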